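-- pv_equiv track=rewrite | github.com/lisandro-git/Morse-Translator | python/utilities.py | get_exec_path
-- ===== SOURCE A (Python) =====
-- def get_exec_path(full_path: str) -> str:
--     """
--     19111999
--     returns executable (python file) path
--     :param full_path string:
--     """
--     temp = ""
--     len_full_path = len(full_path.split("/"))
--     for i, x in enumerate(full_path.split("/")):
--         if i == len_full_path - 1:
--             exec_path = temp
--             break;
--         temp = temp + x + "/"
--     return exec_path;
-- ===== SOURCE B (Python) =====
-- def get_exec_path(full_path: str) -> str:
--     """Directory prefix of the path: everything up to and including the last '/'."""
--     return full_path[:full_path.rfind("/") + 1]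
-- ===== Notes on version B (the rewrite author's own statement) =====
-- stated objective: idiomatic
-- what changed: Replaced the split-then-reaccumulate loop with a single rightward search for the last separator (str.rfind) plus one slice, building no intermediate list and doing no per-element concatenation.
import Mathlib
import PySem

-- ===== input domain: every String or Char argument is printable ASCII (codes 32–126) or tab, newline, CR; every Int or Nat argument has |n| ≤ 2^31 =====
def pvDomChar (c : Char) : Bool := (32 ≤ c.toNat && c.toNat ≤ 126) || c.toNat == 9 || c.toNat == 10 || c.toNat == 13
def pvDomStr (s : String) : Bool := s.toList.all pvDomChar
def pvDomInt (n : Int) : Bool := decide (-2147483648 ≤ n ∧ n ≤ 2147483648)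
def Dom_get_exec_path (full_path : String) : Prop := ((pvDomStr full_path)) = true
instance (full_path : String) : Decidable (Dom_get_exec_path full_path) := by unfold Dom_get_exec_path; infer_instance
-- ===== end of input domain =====

-- B replaces A's split-and-reaccumulate loop by one rfind of the last separator plus a slice (idiomatic; same value).

-- ===== PORT A =====
-- the for-loop over enumerate(full_path.split("/")): accumulate temp = temp + x + "/",
-- break (returning temp) when i == len - 1, i.e. when exactly one part remains.
-- The [] case is unreachable (split always yields ≥ 1 part; Python would raise NameError there).
def getExecLoopA (temp : List Char) : List (List Char) → List Char
  | [] => temp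
  | [_] => temp
  | x :: rest => getExecLoopA (temp ++ x ++ ['/']) rest

def get_exec_path (full_path : String) : String :=
  String.ofList (getExecLoopA [] (PySem.Chars.splitOn full_path.toList ['/']))

-- ===== PORT B =====
def get_exec_path_alt (full_path : String) : String :=
  PySem.Str.slice full_path none (some (PySem.Str.rfind full_path "/" + 1))

-- ===== PRECONDITION & SPEC =====
def Spec_get_exec_path (full_path : String) (out : String) : Prop := out = get_exec_path_alt full_path
instance (full_path : String) (out : String) : Decidable (Spec_get_exec_path full_path out) := by unfold Spec_get_exec_path; infer_instance

-- ===== CLAIM (what is proved, stated in full; the proofs are below) =====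
def Claim_equal_get_exec_path : Prop := ∀ (full_path : String), Dom_get_exec_path full_path → Spec_get_exec_path full_path (get_exec_path full_path)

-- ===== LEMMAS AND PROOFS =====

-- pure left-recursive characterisation of splitOn cs ['/']
def splitRawSlash : List Char → List (List Char)
  | [] => [[]]
  | c :: t => if c = '/' then [] :: splitRawSlash t else (splitRawSlash t).modifyHead (c :: ·)

theorem splitRawSlash_ne_nil (cs : List Char) : splitRawSlash cs ≠ [] := by
  cases cs with
  | nil => simp [splitRawSlash]
  | cons c t =>
    simp only [splitRawSlash]
    split
    · simp
    · cases h : splitRawSlash t with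
      | nil => exact absurd h (splitRawSlash_ne_nil t)
      | cons p ps => simp [h]

theorem splitOn_go_spec : ∀ (fuel : Nat) (l cur : List Char) (acc : List (List Char)),
    l.length ≤ fuel →
    PySem.Chars.splitOn.go ['/'] fuel l cur acc =
      acc.reverse ++ (splitRawSlash l).modifyHead (cur.reverse ++ ·) := by
  intro fuel
  induction fuel with
  | zero =>
    intro l cur acc h
    have : l = [] := by cases l <;> simp_all
    subst this
    simp [PySem.Chars.splitOn.go, splitRawSlash]
  | succ n ih =>
    intro l cur acc h
    cases l with
    | nil => simp [PySem.Chars.splitOn.go, splitRawSlash]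
    | cons c rest =>
      simp only [PySem.Chars.splitOn.go]
      by_cases hc : c = '/'
      · subst hc
        simp only [List.isPrefixOf, BEq.rfl, Bool.true_and, List.isPrefixOf_nil_left, if_pos]
        rw [ih _ _ _ (by simpa using Nat.le_of_succ_le_succ h)]
        rcases hs : splitRawSlash rest with _ | ⟨p, ps⟩
        · exact absurd hs (splitRawSlash_ne_nil rest)
        · simp [splitRawSlash, hs]
      · have : ['/'].isPrefixOf (c :: rest) = false := by
          simp [List.isPrefixOf, Ne.symm hc]
        rw [this]
        simp only [Bool.false_eq_true, if_false]
        rw [ih _ _ _ (by simpa using Nat.le_of_succ_le_succ h)]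
        simp only [splitRawSlash, if_neg hc, List.reverse_cons]
        cases hs : splitRawSlash rest with
        | nil => exact absurd hs (splitRawSlash_ne_nil rest)
        | cons p ps => simp

theorem splitOn_eq_splitRaw (cs : List Char) :
    PySem.Chars.splitOn cs ['/'] = splitRawSlash cs := by
  unfold PySem.Chars.splitOn
  rw [splitOn_go_spec (cs.length + 1) cs [] [] (Nat.le_succ _)]
  cases hs : splitRawSlash cs with
  | nil => exact absurd hs (splitRawSlash_ne_nil cs)
  | cons p ps => simp

-- rfind facts for the single-character needle "/"
theorem rfind_go_zero (s sub : List Char) :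
    PySem.Chars.rfind.go s sub 0 = if sub.isPrefixOf s then 0 else -1 := by
  simp only [PySem.Chars.rfind.go]

theorem rfind_go_succ (s sub : List Char) (k : Nat) :
    PySem.Chars.rfind.go s sub (k + 1) =
      if sub.isPrefixOf (List.drop (k + 1) s) then ((k : Int) + 1)
      else PySem.Chars.rfind.go s sub k := by
  simp only [PySem.Chars.rfind.go]
  split <;> push_cast <;> ring_nf

theorem rfind_go_cons (c : Char) (t : List Char) : ∀ (k : Nat),
    PySem.Chars.rfind.go (c :: t) ['/'] (k + 1) =
      if PySem.Chars.rfind.go t ['/'] k = -1 then (if c = '/' then 0 else -1)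
      else PySem.Chars.rfind.go t ['/'] k + 1 := by
  intro k
  induction k with
  | zero =>
    rw [rfind_go_succ, rfind_go_zero, rfind_go_zero]
    simp only [List.drop_succ_cons, List.drop_zero]
    by_cases hp : ['/'].isPrefixOf t = true
    · simp [hp]
    · simp only [Bool.not_eq_true] at hp
      by_cases hc : c = '/'
      · subst hc; simp [hp, List.isPrefixOf]
      · have hct : ['/'].isPrefixOf (c :: t) = false := by
          simp only [List.isPrefixOf, List.isPrefixOf_nil_left, Bool.and_true]
          exact beq_eq_false_iff_ne.mpr (Ne.symm hc)
        simp [hp, hct, hc]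
  | succ k ih =>
    rw [rfind_go_succ, rfind_go_succ t]
    simp only [List.drop_succ_cons]
    by_cases hp : ['/'].isPrefixOf (t.drop (k + 1)) = true
    · have hne : ((k : Int) + 1) ≠ -1 := by omega
      simp only [hp, if_pos]
      rw [if_neg hne]
      push_cast; ring
    · simp only [Bool.not_eq_true] at hp
      simp only [hp, Bool.false_eq_true, if_false]
      exact ih

theorem rfind_cons (c : Char) (t : List Char) :
    PySem.Chars.rfind (c :: t) ['/'] =
      if PySem.Chars.rfind t ['/'] = -1 then (if c = '/' then 0 else -1)
      else PySem.Chars.rfind t ['/'] + 1 := by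
  unfold PySem.Chars.rfind
  have : (c :: t).length = t.length + 1 := by simp
  rw [this, rfind_go_cons]

theorem rfind_nil : PySem.Chars.rfind [] ['/'] = -1 := by decide

theorem rfind_nonneg_or (cs : List Char) :
    PySem.Chars.rfind cs ['/'] = -1 ∨ 0 ≤ PySem.Chars.rfind cs ['/'] := by
  induction cs with
  | nil => left; exact rfind_nil
  | cons c t ih =>
    rw [rfind_cons]
    rcases ih with h | h
    · simp [h]; by_cases hc : c = '/' <;> simp [hc]
    · split
      · by_cases hc : c = '/' <;> simp [hc]
      · right; omega

theorem rfind_eq_neg_one_iff (cs : List Char) :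
    PySem.Chars.rfind cs ['/'] = -1 ↔ '/' ∉ cs := by
  induction cs with
  | nil => simp [rfind_nil]
  | cons c t ih =>
    rw [rfind_cons]
    by_cases ht : PySem.Chars.rfind t ['/'] = -1
    · by_cases hc : c = '/' <;> simp [ht, hc, ih.mp ht] <;> tauto
    · rcases rfind_nonneg_or t with h | h
      · exact absurd h ht
      · have : '/' ∈ t := by
          by_contra hm
          exact ht (ih.mpr hm)
        simp [ht, this]
        omega

-- the common value: the prefix of length (rfind + 1)
def rlast (cs : List Char) : Nat := (PySem.Chars.rfind cs ['/'] + 1).toNat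

theorem rlast_nil : rlast [] = 0 := by decide

theorem rlast_cons_mem (c : Char) (t : List Char) (h : '/' ∈ t) :
    rlast (c :: t) = rlast t + 1 := by
  unfold rlast
  rw [rfind_cons]
  have ht : PySem.Chars.rfind t ['/'] ≠ -1 := fun he => (rfind_eq_neg_one_iff t).mp he h
  rcases rfind_nonneg_or t with h0 | h0
  · exact absurd h0 ht
  · simp [ht]; omega

theorem rlast_cons_slash_not_mem (t : List Char) (h : '/' ∉ t) :
    rlast ('/' :: t) = 1 := by
  unfold rlast
  rw [rfind_cons, if_pos ((rfind_eq_neg_one_iff t).mpr h), if_pos rfl]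
  rfl

theorem rlast_cons_not_mem (c : Char) (t : List Char) (hc : c ≠ '/') (h : '/' ∉ t) :
    rlast (c :: t) = 0 := by
  unfold rlast
  rw [rfind_cons, if_pos ((rfind_eq_neg_one_iff t).mpr h), if_neg hc]
  rfl

theorem splitRaw_of_not_mem (t : List Char) (h : '/' ∉ t) : splitRawSlash t = [t] := by
  induction t with
  | nil => rfl
  | cons c r ih =>
    simp only [List.mem_cons, not_or] at h
    simp [splitRawSlash, Ne.symm h.1, ih h.2]

theorem splitRaw_two_of_mem (t : List Char) (h : '/' ∈ t) :
    ∃ p ps, splitRawSlash t = p :: ps ∧ ps ≠ [] := by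
  induction t with
  | nil => simp at h
  | cons c r ih =>
    by_cases hc : c = '/'
    · subst hc
      cases hs : splitRawSlash r with
      | nil => exact absurd hs (splitRawSlash_ne_nil r)
      | cons p ps => exact ⟨[], p :: ps, by simp [splitRawSlash, hs], by simp⟩
    · have hr : '/' ∈ r := by
        rcases List.mem_cons.mp h with h1 | h1
        · exact absurd h1.symm hc
        · exact h1
      rcases ih hr with ⟨p, ps, hps, hne⟩
      cases ps with
      | nil => exact absurd rfl hne
      | cons q qs => exact ⟨c :: p, q :: qs, by simp [splitRawSlash, hc, hps], by simp⟩

theorem loopA_spec : ∀ (cs temp : List Char),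
    getExecLoopA temp (splitRawSlash cs) = temp ++ cs.take (rlast cs) := by
  intro cs
  induction cs with
  | nil => intro temp; simp [splitRawSlash, getExecLoopA, rlast_nil]
  | cons c t ih =>
    intro temp
    by_cases hc : c = '/'
    · subst hc
      cases hs : splitRawSlash t with
      | nil => exact absurd hs (splitRawSlash_ne_nil t)
      | cons p ps =>
        have step : getExecLoopA temp (splitRawSlash ('/' :: t)) =
            getExecLoopA (temp ++ ['/']) (splitRawSlash t) := by
          simp only [splitRawSlash, hs]
          cases ps with
          | nil => simp [getExecLoopA]
          | cons q qs => simp [getExecLoopA]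
        rw [step, ih]
        by_cases hm : '/' ∈ t
        · rw [rlast_cons_mem '/' t hm]; simp
        · rw [rlast_cons_slash_not_mem t hm]
          have : rlast t = 0 := by
            unfold rlast
            rw [(rfind_eq_neg_one_iff t).mpr hm]; rfl
          simp [this]
    · by_cases hm : '/' ∈ t
      · rcases splitRaw_two_of_mem t hm with ⟨p, ps, hps, hne⟩
        cases ps with
        | nil => exact absurd rfl hne
        | cons q qs =>
          have step : getExecLoopA temp (splitRawSlash (c :: t)) =
              getExecLoopA (temp ++ [c]) (splitRawSlash t) := by
            simp only [splitRawSlash, if_neg hc, hps]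
            simp [getExecLoopA]
          rw [step, ih, rlast_cons_mem c t hm]
          simp
      · have hnm : '/' ∉ c :: t := by
          simp [hm]
          intro h; exact hc h.symm
        rw [splitRaw_of_not_mem _ hnm]
        simp [getExecLoopA, rlast_cons_not_mem c t hc hm]

theorem alt_toList (full_path : String) :
    (get_exec_path_alt full_path).toList = full_path.toList.take (rlast full_path.toList) := by
  unfold get_exec_path_alt
  rw [PySem.Str.toList_slice]
  unfold PySem.Str.rfind
  have hsep : "/".toList = ['/'] := rfl
  rw [hsep, PySem.Chars.slice_eq_listSlice,
    PySem.List.slice_to full_path.toList (by rcases rfind_nonneg_or full_path.toList with h | h <;> omega)]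
  unfold rlast; rfl

-- ===== VERDICT (by name: the statement is the Claim_ definition above) =====
theorem get_exec_path_spec : Claim_equal_get_exec_path := by
  intro full_path _
  unfold Spec_get_exec_path get_exec_path
  rw [splitOn_eq_splitRaw, loopA_spec, List.nil_append]
  have h := alt_toList full_path
  have : get_exec_path_alt full_path = String.ofList (get_exec_path_alt full_path).toList := by
    simp
  rw [this, h]
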